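-- pv_equiv track=rewrite | github.com/umran/pmeister | wilcoxon.py | criticalCombinations
-- ===== SOURCE A (Python) =====
-- import itertools
--
-- def criticalCombinations(ranks, wA, nA, alt):
--     count = 0
--     combinations = itertools.combinations(ranks, nA)
--     for comb in combinations:
--         sum = 0
--         for i in range(len(comb)):
--             sum += comb[i]
--
--         if alt == "gt" or alt == "et":
--             if sum >= wA:
--                 count += 1
--         elif alt == "lt":
--             if sum <= wA:
--                 count += 1
--     return count
-- ===== SOURCE B (Python) =====
-- def criticalCombinations(ranks, wA, nA, alt):
--     if alt == "gt" or alt == "et":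
--         ge = True
--     elif alt == "lt":
--         ge = False
--     else:
--         return 0
--     n = len(ranks)
--     memo = {}
--
--     def cnt(i, k, w):
--         # number of k-subsets of ranks[i:] whose sum s satisfies s >= w (ge) / s <= w (not ge)
--         if k == 0:
--             return 1 if ((0 >= w) if ge else (0 <= w)) else 0
--         if i == n:
--             return 0
--         key = (i, k, w)
--         r = memo.get(key)
--         if r is None:
--             r = cnt(i + 1, k, w) + cnt(i + 1, k - 1, w - ranks[i])
--             memo[key] = r
--         return r
--
--     return cnt(0, nA, wA)
-- ===== Notes on version B (the rewrite author's own statement) =====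
-- stated objective: faster
-- what changed: Instead of materialising every nA-combination and summing it, B counts qualifying subsets by a memoized include/exclude recursion on (index, k, remaining threshold), a top-down subset-sum DP that shares overlapping subproblems.
import Mathlib
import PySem

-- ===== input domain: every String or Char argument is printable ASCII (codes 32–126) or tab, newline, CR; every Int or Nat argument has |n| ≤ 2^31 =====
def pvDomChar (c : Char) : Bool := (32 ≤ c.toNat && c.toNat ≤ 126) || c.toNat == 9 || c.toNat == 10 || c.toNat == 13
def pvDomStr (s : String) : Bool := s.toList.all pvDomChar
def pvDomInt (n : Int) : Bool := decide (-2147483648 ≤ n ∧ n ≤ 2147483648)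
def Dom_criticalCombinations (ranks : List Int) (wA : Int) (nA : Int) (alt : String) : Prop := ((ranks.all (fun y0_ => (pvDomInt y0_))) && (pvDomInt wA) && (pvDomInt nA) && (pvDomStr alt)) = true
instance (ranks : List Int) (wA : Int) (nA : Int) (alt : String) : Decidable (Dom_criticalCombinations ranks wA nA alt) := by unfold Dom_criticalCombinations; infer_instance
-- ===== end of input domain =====

-- B replaces A's enumeration of all nA-combinations by a memoized include/exclude
-- recursion on (position, subset size left, remaining threshold); the memo table in
-- Source B only shares work and does not change values, so its port is the plain recursion.

-- ===== PORT A =====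
-- itertools.combinations(ranks, nA) in its emission order (ranks : List Int, r : Nat)
def pvCombs : Nat → List Int → List (List Int)
  | 0, _ => [[]]
  | _ + 1, [] => []
  | k + 1, x :: xs => ((pvCombs k xs).map (fun c => x :: c)) ++ pvCombs (k + 1) xs

def criticalCombinations (ranks : List Int) (wA : Int) (nA : Int) (alt : String) : Int :=
  -- count = 0; for comb in combinations: sum the tuple, then the alt branches
  -- (nA < 0 makes Python raise ValueError; excluded by Pre_ below)
  (pvCombs nA.toNat ranks).foldl
    (fun count comb =>
      let s := comb.foldl (fun acc x => acc + x) 0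
      if alt == "gt" || alt == "et" then (if s ≥ wA then count + 1 else count)
      else if alt == "lt" then (if s ≤ wA then count + 1 else count)
      else count) 0

-- ===== PORT B =====
-- cnt(i, k, w) of Source B, recursing on the suffix ranks[i:] (memoization omitted: value-neutral)
def pvCnt (ge : Bool) (xs : List Int) (k : Int) (w : Int) : Int :=
  if k = 0 then (if (if ge then 0 ≥ w else 0 ≤ w) then 1 else 0)
  else
    match xs with
    | [] => 0
    | x :: rest => pvCnt ge rest k w + pvCnt ge rest (k - 1) (w - x)

def criticalCombinations_alt (ranks : List Int) (wA : Int) (nA : Int) (alt : String) : Int :=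
  if alt == "gt" || alt == "et" then pvCnt true ranks nA wA
  else if alt == "lt" then pvCnt false ranks nA wA
  else 0

-- ===== PRECONDITION & SPEC =====
-- Pre_ excludes only nA < 0, where itertools.combinations makes A raise ValueError
-- (B naturally returns 0 there: no subsets of negative size exist).
def Pre_criticalCombinations (ranks : List Int) (wA : Int) (nA : Int) (alt : String) : Prop := 0 ≤ nA
instance (ranks : List Int) (wA : Int) (nA : Int) (alt : String) : Decidable (Pre_criticalCombinations ranks wA nA alt) := by unfold Pre_criticalCombinations; infer_instance

def pvWitness_criticalCombinations : List Int × Int × Int × String := ([1, 2, 3], 3, 2, "gt")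

def Spec_criticalCombinations (ranks : List Int) (wA : Int) (nA : Int) (alt : String) (out : Int) : Prop := out = criticalCombinations_alt ranks wA nA alt
instance (ranks : List Int) (wA : Int) (nA : Int) (alt : String) (out : Int) : Decidable (Spec_criticalCombinations ranks wA nA alt out) := by unfold Spec_criticalCombinations; infer_instance

-- ===== CLAIM (what is proved, stated in full; the proofs are below) =====
def Claim_equal_criticalCombinations : Prop := ∀ (ranks : List Int) (wA : Int) (nA : Int) (alt : String), Dom_criticalCombinations ranks wA nA alt → Pre_criticalCombinations ranks wA nA alt → Spec_criticalCombinations ranks wA nA alt (criticalCombinations ranks wA nA alt)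

-- ===== LEMMAS AND PROOFS =====

-- the Boolean predicate A tests on each combination, once alt is fixed
def pvPred (ge : Bool) (w : Int) (c : List Int) : Bool :=
  if ge then decide (c.foldl (fun acc x => acc + x) 0 ≥ w)
  else decide (c.foldl (fun acc x => acc + x) 0 ≤ w)

lemma pvFoldlAddShift (l : List Int) (a : Int) :
    l.foldl (fun acc y => acc + y) a = a + l.foldl (fun acc y => acc + y) 0 := by
  rw [PySem.List.foldl_add (g := fun y => y), PySem.List.foldl_add (g := fun y => y)]
  simp

lemma pvPred_cons (ge : Bool) (w x : Int) (c : List Int) :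
    pvPred ge w (x :: c) = pvPred ge (w - x) c := by
  cases ge <;>
    simp only [pvPred, List.foldl_cons, pvFoldlAddShift c ((0 : Int) + x),
      Bool.false_eq_true, if_false, if_true, decide_eq_decide, ge_iff_le] <;>
    omega

-- the heart: counting the qualifying combinations equals B's recursion
lemma countP_combs (ge : Bool) :
    ∀ (xs : List Int) (k : Nat) (w : Int),
      (((pvCombs k xs).countP (pvPred ge w) : Nat) : Int) = pvCnt ge xs (k : Int) w := by
  intro xs
  induction xs with
  | nil =>
    intro k w
    cases k with
    | zero =>
      cases ge <;> simp [pvCombs, pvCnt, pvPred, List.countP_cons]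
    | succ j =>
      rw [pvCnt]
      simp only [pvCombs, List.countP_nil, Nat.cast_zero]
      rw [if_neg (show ¬ (((j + 1 : Nat) : Int) = 0) by omega)]
  | cons x rest ih =>
    intro k w
    cases k with
    | zero =>
      cases ge <;> simp [pvCombs, pvCnt, pvPred, List.countP_cons]
    | succ j =>
      have hk : ¬ (((j + 1 : Nat) : Int) = 0) := by omega
      have hk1 : ((j + 1 : Nat) : Int) - 1 = (j : Int) := by omega
      rw [pvCnt]
      simp only [if_neg hk, hk1]
      have hmap : ((pvCombs j rest).map (fun c => x :: c)).countP (pvPred ge w)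
          = (pvCombs j rest).countP (pvPred ge (w - x)) := by
        rw [List.countP_map]
        exact List.countP_congr (fun c _ => by simp [Function.comp, pvPred_cons])
      rw [pvCombs, List.countP_append, hmap]
      have h1 := ih j (w - x)
      have h2 := ih (j + 1) w
      push_cast at h1 h2 ⊢
      omega

-- ===== VERDICT (by name: the statement is the Claim_ definition above) =====
theorem criticalCombinations_spec : Claim_equal_criticalCombinations := by
  intro ranks wA nA alt _ hpre
  unfold Spec_criticalCombinations criticalCombinations criticalCombinations_alt
  have hnA : ((nA.toNat : Nat) : Int) = nA := Int.toNat_of_nonneg hpre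
  by_cases hge : (alt == "gt" || alt == "et") = true
  · simp only [hge, if_true]
    rw [PySem.List.foldl_ite_add_one
        (p := fun c : List Int => c.foldl (fun acc x => acc + x) 0 ≥ wA), zero_add]
    have hp : (fun c : List Int => decide (c.foldl (fun acc x => acc + x) 0 ≥ wA))
        = pvPred true wA := by
      funext c; simp [pvPred]
    rw [hp, ← hnA]
    exact countP_combs true ranks nA.toNat wA
  · simp only [Bool.not_eq_true] at hge
    simp only [hge, Bool.false_eq_true, if_false]
    by_cases hlt : (alt == "lt") = true
    · simp only [hlt, if_true]
      rw [PySem.List.foldl_ite_add_one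
          (p := fun c : List Int => c.foldl (fun acc x => acc + x) 0 ≤ wA), zero_add]
      have hp : (fun c : List Int => decide (c.foldl (fun acc x => acc + x) 0 ≤ wA))
          = pvPred false wA := by
        funext c; simp [pvPred]
      rw [hp, ← hnA]
      exact countP_combs false ranks nA.toNat wA
    · simp only [Bool.not_eq_true] at hlt
      simp only [hlt, Bool.false_eq_true, if_false]
      exact PySem.List.foldl_ignore (pvCombs nA.toNat ranks) 0
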